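-- pv_equiv track=rewrite | github.com/SE-Researcher/ASE2018 | examples/eq/is_prime2/is_prime2_upgr.py | lib
-- ===== SOURCE A (Python) =====
-- primes = [ 2, 3, 5, 7, 11, 13, 17, 19 ]
--
-- def lib(x, b):
--   if (b == 0):
--     return 0
--   else:
--     for p in primes:
--       mod = x % p
--       if (mod == 0):
--         if x == p:
--             return 1
--         else:
--             return 0
--   return 1
-- ===== SOURCE B (Python) =====
-- PRIMORIAL = 9699690  # 2*3*5*7*11*13*17*19
-- PRIMES = {2, 3, 5, 7, 11, 13, 17, 19}
--
-- def lib(x, b):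
--     if b == 0:
--         return 0
--     # x is coprime to every listed prime iff gcd(x, PRIMORIAL) == 1,
--     # computed by one Euclidean run instead of trial division.
--     m, g = PRIMORIAL, x % PRIMORIAL
--     while g:
--         m, g = g, m % g
--     return 1 if (m == 1 or x in PRIMES) else 0
-- ===== Notes on version B (the rewrite author's own statement) =====
-- stated objective: alternative
-- what changed: Replaces A's per-prime trial-division loop with a single Euclidean gcd computation against the primorial 9699690 = 2*3*5*7*11*13*17*19 (gcd == 1 iff no listed prime divides x), plus a set-membership test for x being one of the listed primes.
import Mathlib
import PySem

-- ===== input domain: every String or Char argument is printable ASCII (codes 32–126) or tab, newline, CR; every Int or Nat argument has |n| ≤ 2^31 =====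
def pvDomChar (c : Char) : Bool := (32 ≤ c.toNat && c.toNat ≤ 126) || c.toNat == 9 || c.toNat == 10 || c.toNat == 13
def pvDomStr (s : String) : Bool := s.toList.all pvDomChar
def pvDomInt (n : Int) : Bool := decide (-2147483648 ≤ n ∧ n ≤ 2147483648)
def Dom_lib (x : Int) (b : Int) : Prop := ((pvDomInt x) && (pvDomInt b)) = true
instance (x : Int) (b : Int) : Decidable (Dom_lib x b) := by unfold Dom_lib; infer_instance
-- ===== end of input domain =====

-- B replaces A's trial-division loop by one Euclidean-gcd run against the primorial
-- 9699690 = 2·3·5·7·11·13·17·19, plus a set-membership test (objective: alternative).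

-- ===== PORT A =====
def libPrimes : List Int := [2, 3, 5, 7, 11, 13, 17, 19]

def libLoop (x : Int) : List Int → Int
  | [] => 1
  | p :: ps =>
      if PySem.Int.mod x p = 0 then (if x = p then 1 else 0)
      else libLoop x ps

def lib (x : Int) (b : Int) : Int :=
  if b = 0 then 0 else libLoop x libPrimes

-- ===== PORT B =====
def libPrimorial : Int := 9699690

def libPrimeSet : List Int := [2, 3, 5, 7, 11, 13, 17, 19]  -- the Python set PRIMES

-- the `while g: m, g = g, m % g` loop of Source B (Python's % = PySem.Int.mod)
def libEuclid (m g : Int) : Int :=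
  if g = 0 then m
  else libEuclid g (PySem.Int.mod m g)
termination_by g.natAbs
decreasing_by
  rename_i hg
  rcases lt_trichotomy g 0 with h | h | h
  · have := PySem.Int.mod_neg_bounds m h
    omega
  · exact absurd h hg
  · have h1 := PySem.Int.mod_nonneg m h
    have h2 := PySem.Int.mod_lt m h
    omega

def lib_alt (x : Int) (b : Int) : Int :=
  if b = 0 then 0
  else
    let m := libEuclid libPrimorial (PySem.Int.mod x libPrimorial)
    if m = 1 || libPrimeSet.contains x then 1 else 0

-- ===== PRECONDITION & SPEC =====
def Spec_lib (x : Int) (b : Int) (out : Int) : Prop := out = lib_alt x b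
instance (x : Int) (b : Int) (out : Int) : Decidable (Spec_lib x b out) := by unfold Spec_lib; infer_instance

-- ===== CLAIM (what is proved, stated in full; the proofs are below) =====
def Claim_equal_lib : Prop := ∀ (x : Int) (b : Int), Dom_lib x b → Spec_lib x b (lib x b)

-- ===== LEMMAS AND PROOFS =====

-- A's fused loop in membership/scan form
theorem lib_core (x : Int) :
    libLoop x libPrimes =
      (if libPrimes.contains x || !(libPrimes.any (fun p => PySem.Int.mod x p = 0)) then 1 else 0) := by
  simp only [libPrimes, libLoop, List.contains_cons, List.any_cons, List.any_nil,
    List.contains_nil, PySem.Int.mod_eq_emod_of_pos (by norm_num : (0:Int) < 2),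
    PySem.Int.mod_eq_emod_of_pos (by norm_num : (0:Int) < 3),
    PySem.Int.mod_eq_emod_of_pos (by norm_num : (0:Int) < 5),
    PySem.Int.mod_eq_emod_of_pos (by norm_num : (0:Int) < 7),
    PySem.Int.mod_eq_emod_of_pos (by norm_num : (0:Int) < 11),
    PySem.Int.mod_eq_emod_of_pos (by norm_num : (0:Int) < 13),
    PySem.Int.mod_eq_emod_of_pos (by norm_num : (0:Int) < 17),
    PySem.Int.mod_eq_emod_of_pos (by norm_num : (0:Int) < 19)]
  simp only [Bool.or_eq_true, Bool.not_eq_true', Bool.or_eq_false_iff, beq_iff_eq,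
    decide_eq_false_iff_not]
  split_ifs <;> try omega
  all_goals rename_i hbig
  all_goals first
    | exact absurd (Or.inr ⟨‹_›, ‹_›, ‹_›, ‹_›, ‹_›, ‹_›, ‹_›, ‹_›, trivial⟩) hbig
    | (rcases hbig with (h | h | h | h | h | h | h | h | h) | h <;> first | omega | exact h.elim)

-- the Euclidean loop computes the gcd (on nonnegative arguments)
theorem libEuclid_gcd (m g : Int) (hm : 0 ≤ m) (hg : 0 ≤ g) :
    libEuclid m g = (Int.gcd m g : Int) := by
  by_cases h0 : g = 0
  · subst h0
    rw [libEuclid]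
    simp [Int.gcd, Int.natAbs_of_nonneg hm]
  · have hgpos : 0 < g := lt_of_le_of_ne hg (Ne.symm h0)
    rw [libEuclid]
    simp only [h0, if_neg, not_false_iff]
    rw [PySem.Int.mod_eq_emod_of_pos hgpos]
    rw [libEuclid_gcd g (m % g) hg (Int.emod_nonneg m h0)]
    rw [Int.gcd_comm g (m % g), Int.gcd_emod]
termination_by g.natAbs
decreasing_by
  have h1 := Int.emod_nonneg m h0
  have h2 := Int.emod_lt_of_pos m hgpos
  omega

theorem dvd_natAbs_iff (p : Nat) (x : Int) : p ∣ x.natAbs ↔ (p : Int) ∣ x := by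
  rw [← Int.natAbs_dvd_natAbs]; simp

theorem coprime_prime_iff (p : Nat) (hp : Nat.Prime p) (x : Int) :
    Nat.Coprime x.natAbs p ↔ ¬ (p : Int) ∣ x := by
  rw [Nat.coprime_comm, Nat.Prime.coprime_iff_not_dvd hp, dvd_natAbs_iff]

-- gcd with the primorial is 1 iff no listed prime divides x
theorem gcd_primorial_eq_one (x : Int) :
    (Int.gcd x libPrimorial = 1) ↔
      (¬ (2:Int) ∣ x ∧ ¬ (3:Int) ∣ x ∧ ¬ (5:Int) ∣ x ∧ ¬ (7:Int) ∣ x ∧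
       ¬ (11:Int) ∣ x ∧ ¬ (13:Int) ∣ x ∧ ¬ (17:Int) ∣ x ∧ ¬ (19:Int) ∣ x) := by
  have hP : libPrimorial = ((2*3*5*7*11*13*17*19 : Nat) : Int) := by decide
  have hg : Int.gcd x libPrimorial = Nat.gcd x.natAbs (2*3*5*7*11*13*17*19) := by
    rw [hP]; simp [Int.gcd]
  rw [hg]
  show Nat.Coprime x.natAbs (2*3*5*7*11*13*17*19) ↔ _
  rw [Nat.coprime_mul_iff_right, Nat.coprime_mul_iff_right, Nat.coprime_mul_iff_right,
      Nat.coprime_mul_iff_right, Nat.coprime_mul_iff_right, Nat.coprime_mul_iff_right,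
      Nat.coprime_mul_iff_right,
      coprime_prime_iff 2 (by norm_num) x, coprime_prime_iff 3 (by norm_num) x,
      coprime_prime_iff 5 (by norm_num) x, coprime_prime_iff 7 (by norm_num) x,
      coprime_prime_iff 11 (by norm_num) x, coprime_prime_iff 13 (by norm_num) x,
      coprime_prime_iff 17 (by norm_num) x, coprime_prime_iff 19 (by norm_num) x]
  push_cast
  tauto

-- B's euclid result is the gcd of x with the primorial
theorem libEuclid_primorial (x : Int) :
    libEuclid libPrimorial (PySem.Int.mod x libPrimorial) = (Int.gcd x libPrimorial : Int) := by
  have hP : (0:Int) < libPrimorial := by decide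
  rw [libEuclid_gcd _ _ (le_of_lt hP) (PySem.Int.mod_nonneg x hP),
      PySem.Int.mod_eq_emod_of_pos hP, Int.gcd_comm libPrimorial, Int.gcd_emod]

-- ===== VERDICT (by name: the statement is the Claim_ definition above) =====
theorem lib_spec : Claim_equal_lib := by
  intro x b _
  unfold Spec_lib lib lib_alt
  by_cases hb : b = 0
  · simp [hb]
  · simp only [hb, if_neg, not_false_iff]
    rw [lib_core, libEuclid_primorial]
    have hmemeq : libPrimeSet.contains x = libPrimes.contains x := rfl
    rw [hmemeq]
    by_cases hmem : libPrimes.contains x = true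
    · have hx : x ∈ libPrimes := by simpa using hmem
      simp [hx]
    · simp only [hmem, Bool.or_false, Bool.false_or]
      by_cases hg1 : Int.gcd x libPrimorial = 1
      · have hnd := (gcd_primorial_eq_one x).mp hg1
        have : (libPrimes.any (fun p => PySem.Int.mod x p = 0)) = false := by
          simp only [libPrimes, List.any_cons, List.any_nil, Bool.or_eq_false_iff,
            decide_eq_false_iff_not, PySem.Int.mod_eq_zero_iff_dvd]
          tauto
        simp [hg1, this]
      · have : (libPrimes.any (fun p => PySem.Int.mod x p = 0)) = true := by
          by_contra hany
          apply hg1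
          rw [gcd_primorial_eq_one x]
          simp only [libPrimes, List.any_cons, List.any_nil, Bool.or_eq_false_iff,
            decide_eq_false_iff_not, PySem.Int.mod_eq_zero_iff_dvd,
            Bool.not_eq_true] at hany
          tauto
        have hgc : ((Int.gcd x libPrimorial : Int) = 1) = False := by
          simp only [eq_iff_iff, iff_false]
          exact_mod_cast hg1
        simp [this, hgc]
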